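-- pv_equiv track=rewrite | github.com/paulisuden/ia-uncuyo-2024 | tp6-csp/code/backtracking.py | selecciona_variable_mas_restringida
-- ===== SOURCE A (Python) =====
-- def selecciona_variable_mas_restringida(asignacion, n):
--     mejor_fila = None
--     menor_numero_de_opciones = float('inf')  # Número de opciones más bajo
--
--     for fila in range(n):
--         if fila in range(len(asignacion)):  # Ignoramos filas ya asignadas
--             continue
--
--         # Contamos cuántas columnas son válidas para esta fila
--         num_opciones_validas = 0
--         for columna in range(n):
--             if es_consistente(fila, columna, asignacion):
--                 num_opciones_validas += 1
--
--         # Si esta fila tiene menos opciones que las anteriores, la elegimos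
--         if num_opciones_validas < menor_numero_de_opciones:
--             menor_numero_de_opciones = num_opciones_validas
--             mejor_fila = fila
--
--     return mejor_fila
--
-- def es_consistente(fila, columna, asignacion):
--     # Verificar si la colocación es válida (sin conflictos)
--     for fila_existente in range(len(asignacion)):
--         columna_existente = asignacion[fila_existente]
--
--         # Chequear si hay conflictos en la misma columna
--         if columna_existente == columna:
--             return False
--
--         # Chequear si están en la misma diagonal
--         if abs(columna_existente - columna) == abs(fila_existente - fila):
--             return False
--
--     # Si pasa todas las verificaciones, es consistente
--     return True
-- ===== SOURCE B (Python) =====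
-- def selecciona_variable_mas_restringida(asignacion, n):
--     mejor_fila = None
--     menor = None
--     for fila in range(len(asignacion), n):
--         prohibidas = set()
--         for r, c in enumerate(asignacion):
--             d = fila - r
--             for col in (c, c + d, c - d):
--                 if 0 <= col < n:
--                     prohibidas.add(col)
--         opciones = n - len(prohibidas)
--         if menor is None or opciones < menor:
--             menor = opciones
--             mejor_fila = fila
--     return mejor_fila
-- ===== Notes on version B (the rewrite author's own statement) =====
-- stated objective: alternative
-- what changed: Instead of testing every column of every candidate row with es_consistente (a scan of the whole assignment per column), B builds for each candidate row the forbidden-column set directly from the assignment (column and two clipped diagonals per placed queen) and counts valid options as n minus its size, eliminating the inner loop over the n columns (O(n*len) vs O(n^2*len); measured ~2.8x median at the largest size but not consistently >=1.5x per input, so not claimed as faster).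
import Mathlib
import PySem

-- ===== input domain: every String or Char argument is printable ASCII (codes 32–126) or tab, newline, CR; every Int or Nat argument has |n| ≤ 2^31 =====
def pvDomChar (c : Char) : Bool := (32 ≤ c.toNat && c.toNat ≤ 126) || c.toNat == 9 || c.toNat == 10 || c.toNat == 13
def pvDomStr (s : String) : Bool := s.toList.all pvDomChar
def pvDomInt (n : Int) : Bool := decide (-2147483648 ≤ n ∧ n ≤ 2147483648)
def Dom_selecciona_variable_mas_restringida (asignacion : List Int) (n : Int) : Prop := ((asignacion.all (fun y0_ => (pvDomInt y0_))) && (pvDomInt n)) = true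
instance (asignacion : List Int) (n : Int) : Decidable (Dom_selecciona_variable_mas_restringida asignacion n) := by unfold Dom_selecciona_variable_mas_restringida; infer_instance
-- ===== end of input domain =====

-- B replaces A's inner loop over all n columns by a forbidden-column set built
-- directly from the assignment, so each candidate row costs O(|asignacion|) work
-- instead of a scan of all n columns (objective: alternative algorithm).

-- ===== PORT A =====
-- helper es_consistente: the early-return conflict loop is the 'all p' over the enumerated assignment
def esConsistente (fila columna : Int) (asignacion : List Int) : Bool :=
  (PySem.List.enumerate asignacion).all (fun p =>
    !(p.2 == columna) && !((p.2 - columna).natAbs == (p.1 - fila).natAbs))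

-- one iteration of A's outer loop; state = (mejor_fila, menor_numero_de_opciones),
-- none in the 2nd slot = float('inf')
def pasoA (asignacion : List Int) (n : Int) (st : Option Int × Option Int) (fila : Int) :
    Option Int × Option Int :=
  if 0 ≤ fila ∧ fila < (asignacion.length : Int) then st
  else
    let num := (PySem.List.pyRange 0 n 1).foldl
      (fun acc col => if esConsistente fila col asignacion then acc + 1 else acc) (0 : Int)
    match st.2 with
    | none => (some fila, some num)
    | some m => if num < m then (some fila, some num) else st

def selecciona_variable_mas_restringida (asignacion : List Int) (n : Int) : Option Int :=
  ((PySem.List.pyRange 0 n 1).foldl (pasoA asignacion n) (none, none)).1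

-- ===== PORT B =====
def prohibidasDe (asignacion : List Int) (n fila : Int) : PySem.Set Int :=
  (PySem.List.enumerate asignacion).foldl
    (fun (s : PySem.Set Int) p =>
      let d := fila - p.1
      [p.2, p.2 + d, p.2 - d].foldl
        (fun (s : PySem.Set Int) col =>
          if 0 ≤ col ∧ col < n then PySem.Set.add s col else s) s)
    PySem.Set.empty

-- one iteration of B's loop over the candidate rows
def pasoB (asignacion : List Int) (n : Int) (st : Option Int × Option Int) (fila : Int) :
    Option Int × Option Int :=
  let opciones := n - ((prohibidasDe asignacion n fila).length : Int)
  match st.2 with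
  | none => (some fila, some opciones)
  | some m => if opciones < m then (some fila, some opciones) else st

def selecciona_variable_mas_restringida_alt (asignacion : List Int) (n : Int) : Option Int :=
  ((PySem.List.pyRange (asignacion.length : Int) n 1).foldl (pasoB asignacion n) (none, none)).1

-- ===== PRECONDITION & SPEC =====
def Spec_selecciona_variable_mas_restringida (asignacion : List Int) (n : Int) (out : Option Int) : Prop := out = selecciona_variable_mas_restringida_alt asignacion n
instance (asignacion : List Int) (n : Int) (out : Option Int) : Decidable (Spec_selecciona_variable_mas_restringida asignacion n out) := by unfold Spec_selecciona_variable_mas_restringida; infer_instance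

-- ===== CLAIM (what is proved, stated in full; the proofs are below) =====
def Claim_equal_selecciona_variable_mas_restringida : Prop := ∀ (asignacion : List Int) (n : Int), Dom_selecciona_variable_mas_restringida asignacion n → Spec_selecciona_variable_mas_restringida asignacion n (selecciona_variable_mas_restringida asignacion n)

-- ===== LEMMAS AND PROOFS =====

theorem mem_inner_if (n : Int) (s : PySem.Set Int) (col y : Int) :
    (y ∈ (if 0 ≤ col ∧ col < n then PySem.Set.add s col else s)) ↔
      y ∈ s ∨ ((0 ≤ y ∧ y < n) ∧ y = col) := by
  split_ifs with h
  · rw [PySem.Set.mem_add]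
    constructor
    · rintro (hs | rfl)
      · exact Or.inl hs
      · exact Or.inr ⟨h, rfl⟩
    · rintro (hs | ⟨_, rfl⟩)
      · exact Or.inl hs
      · exact Or.inr rfl
  · constructor
    · exact Or.inl
    · rintro (hs | ⟨hb, rfl⟩)
      · exact hs
      · exact absurd hb h

theorem mem_prohibidas_aux (n fila : Int) (l : List (Int × Int)) (s : PySem.Set Int) (col : Int) :
    col ∈ l.foldl
        (fun (s : PySem.Set Int) p =>
          let d := fila - p.1
          [p.2, p.2 + d, p.2 - d].foldl
            (fun (s : PySem.Set Int) c =>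
              if 0 ≤ c ∧ c < n then PySem.Set.add s c else s) s) s ↔
      col ∈ s ∨ ((0 ≤ col ∧ col < n) ∧ ∃ p ∈ l,
        col = p.2 ∨ col = p.2 + (fila - p.1) ∨ col = p.2 - (fila - p.1)) := by
  induction l generalizing s with
  | nil => simp
  | cons p l ih =>
    rw [List.foldl_cons, ih]
    simp only [List.foldl, List.mem_cons, mem_inner_if]
    constructor
    · rintro ((((hs | h) | h) | h) | ⟨hb, q, hq, hc⟩)
      · exact Or.inl hs
      · exact Or.inr ⟨h.1, p, Or.inl rfl, Or.inl h.2⟩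
      · exact Or.inr ⟨h.1, p, Or.inl rfl, Or.inr (Or.inl h.2)⟩
      · exact Or.inr ⟨h.1, p, Or.inl rfl, Or.inr (Or.inr h.2)⟩
      · exact Or.inr ⟨hb, q, Or.inr hq, hc⟩
    · rintro (hs | ⟨hb, q, (rfl | hq), hc⟩)
      · exact Or.inl (Or.inl (Or.inl (Or.inl hs)))
      · rcases hc with hc | hc | hc
        · exact Or.inl (Or.inl (Or.inl (Or.inr ⟨hb, hc⟩)))
        · exact Or.inl (Or.inl (Or.inr ⟨hb, hc⟩))
        · exact Or.inl (Or.inr ⟨hb, hc⟩)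
      · exact Or.inr ⟨hb, q, hq, hc⟩

theorem mem_prohibidas (asignacion : List Int) (n fila col : Int) :
    col ∈ prohibidasDe asignacion n fila ↔
      (0 ≤ col ∧ col < n) ∧ ∃ p ∈ PySem.List.enumerate asignacion,
        col = p.2 ∨ col = p.2 + (fila - p.1) ∨ col = p.2 - (fila - p.1) := by
  unfold prohibidasDe
  rw [mem_prohibidas_aux]
  simp [PySem.Set.empty]

theorem nodup_prohibidas_aux (n fila : Int) (l : List (Int × Int)) (s : PySem.Set Int)
    (hs : s.Nodup) :
    (l.foldl
        (fun (s : PySem.Set Int) p =>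
          let d := fila - p.1
          [p.2, p.2 + d, p.2 - d].foldl
            (fun (s : PySem.Set Int) c =>
              if 0 ≤ c ∧ c < n then PySem.Set.add s c else s) s) s).Nodup := by
  induction l generalizing s with
  | nil => exact hs
  | cons p l ih =>
    refine ih _ ?_
    simp only [List.foldl]
    split_ifs <;>
      repeat first
        | exact hs
        | apply PySem.Set.nodup_add

theorem nodup_prohibidas (asignacion : List Int) (n fila : Int) :
    (prohibidasDe asignacion n fila).Nodup := by
  unfold prohibidasDe
  exact nodup_prohibidas_aux n fila _ _ List.nodup_nil

theorem esConsistente_false_iff (asignacion : List Int) (fila col : Int)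
    (hf : (asignacion.length : Int) ≤ fila) :
    (esConsistente fila col asignacion = false) ↔
      ∃ p ∈ PySem.List.enumerate asignacion,
        col = p.2 ∨ col = p.2 + (fila - p.1) ∨ col = p.2 - (fila - p.1) := by
  have hb : ∀ p ∈ PySem.List.enumerate asignacion, (0:Int) ≤ p.1 ∧ p.1 < (asignacion.length : Int) := by
    intro p hp
    obtain ⟨k, hk, rfl⟩ := (PySem.List.mem_enumerate_iff _ _ _).mp hp
    simp only [zero_add]
    exact ⟨Int.natCast_nonneg k, by exact_mod_cast hk⟩
  have h0 : ∀ (l : List (Int × Int)) (q : Int × Int → Bool),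
      (l.all q = false) ↔ ∃ x ∈ l, ¬ q x = true := by simp
  unfold esConsistente
  rw [h0]
  constructor
  · rintro ⟨p, hp, hc⟩
    have hbp := hb p hp
    refine ⟨p, hp, ?_⟩
    simp only [Bool.and_eq_true, Bool.not_eq_eq_eq_not, Bool.not_true, beq_eq_false_iff_ne,
      ne_eq, not_and, not_not] at hc
    by_cases h1 : p.2 = col
    · omega
    · have h2 := hc h1
      omega
  · rintro ⟨p, hp, hc⟩
    have hbp := hb p hp
    refine ⟨p, hp, ?_⟩
    simp only [Bool.and_eq_true, Bool.not_eq_eq_eq_not, Bool.not_true, beq_eq_false_iff_ne,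
      ne_eq, not_and, not_not]
    intro h1
    omega

theorem count_eq (asignacion : List Int) (n fila : Int)
    (hf : (asignacion.length : Int) ≤ fila) (hn : fila < n) :
    (PySem.List.pyRange 0 n 1).foldl
        (fun acc col => if esConsistente fila col asignacion then acc + 1 else acc) (0 : Int)
      = n - ((prohibidasDe asignacion n fila).length : Int) := by
  have hperm : ((PySem.List.pyRange 0 n 1).filter
      (fun col => !esConsistente fila col asignacion)).Perm (prohibidasDe asignacion n fila) := by
    refine (List.perm_ext_iff_of_nodup
      (List.Nodup.filter _ (PySem.List.nodup_pyRange_one 0 n)) (nodup_prohibidas asignacion n fila)).mpr ?_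
    intro col
    rw [List.mem_filter, PySem.List.mem_pyRange_one, mem_prohibidas]
    constructor
    · rintro ⟨⟨h0, h1⟩, hbad⟩
      exact ⟨⟨h0, h1⟩, (esConsistente_false_iff asignacion fila col hf).mp (by simpa using hbad)⟩
    · rintro ⟨⟨h0, h1⟩, hex⟩
      exact ⟨⟨h0, h1⟩, by simpa using (esConsistente_false_iff asignacion fila col hf).mpr hex⟩
  have hlen := hperm.length_eq
  rw [PySem.List.foldl_if_add_one]
  have h1 : ((PySem.List.pyRange 0 n 1).countP (fun col => esConsistente fila col asignacion))
      + ((PySem.List.pyRange 0 n 1).countP (fun col => !esConsistente fila col asignacion))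
      = (PySem.List.pyRange 0 n 1).length := by
    simp [List.length_eq_countP_add_countP (fun col => esConsistente fila col asignacion)]
  rw [List.countP_eq_length_filter (l := PySem.List.pyRange 0 n 1)
    (p := fun col => !esConsistente fila col asignacion)] at h1
  have hlen2 : (PySem.List.pyRange 0 n 1).length = n.toNat := by
    rw [PySem.List.length_pyRange_one]
    omega
  omega

-- ===== VERDICT (by name: the statement is the Claim_ definition above) =====
theorem pv_foldl_id {α β : Type} (l : List α) (f : β → α → β) (init : β)
    (h : ∀ st x, x ∈ l → f st x = st) : l.foldl f init = init := by
  induction l generalizing init with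
  | nil => rfl
  | cons x l ih =>
    rw [List.foldl_cons, h init x (List.mem_cons_self ..)]
    exact ih init (fun st y hy => h st y (List.mem_cons_of_mem _ hy))

theorem selecciona_variable_mas_restringida_spec : Claim_equal_selecciona_variable_mas_restringida := by
  intro asignacion n _dom
  unfold Spec_selecciona_variable_mas_restringida
  unfold selecciona_variable_mas_restringida selecciona_variable_mas_restringida_alt
  by_cases hn : n ≤ (asignacion.length : Int)
  · rw [PySem.List.pyRange_one_eq_nil hn, List.foldl_nil]
    refine congrArg Prod.fst (pv_foldl_id _ _ _ ?_)
    intro st fila hm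
    rw [PySem.List.mem_pyRange_one] at hm
    unfold pasoA
    exact if_pos ⟨hm.1, lt_of_lt_of_le hm.2 hn⟩
  · rw [not_le] at hn
    have hskip : ∀ (st : Option Int × Option Int) (fila : Int),
        fila ∈ PySem.List.pyRange 0 (asignacion.length : Int) 1 →
          pasoA asignacion n st fila = st := by
      intro st fila hm
      rw [PySem.List.mem_pyRange_one] at hm
      unfold pasoA
      exact if_pos hm
    rw [PySem.List.pyRange_one_append 0 (asignacion.length : Int) n (Int.natCast_nonneg _)
        (le_of_lt hn),
      List.foldl_append,
      pv_foldl_id (PySem.List.pyRange 0 (asignacion.length : Int) 1)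
        (pasoA asignacion n) (none, none) hskip]
    refine congrArg Prod.fst (PySem.List.foldl_congr_mem _ _ _ _ ?_)
    intro st fila hm
    rw [PySem.List.mem_pyRange_one] at hm
    unfold pasoA pasoB
    rw [if_neg (fun h => absurd h.2 (not_lt.mpr hm.1))]
    simp only [count_eq asignacion n fila hm.1 hm.2]
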